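-- pv_equiv track=rewrite | github.com/eliwaksbaum/aoc | 2021/19/19.py | orientBeacons
-- ===== SOURCE A (Python) =====
-- def rotate(vector, axis):
--     if axis == "x":
--         return (vector[0], -vector[2], vector[1])
--     elif axis == "y":
--         return (-vector[2], vector[1], vector[0])
--     elif axis == "z":
--         return (vector[1], -vector[0], vector[2])
--
-- def orientBeacons(beacons, flips):
--     rotated = []
--     for b in beacons:
--         rb = b
--         for i in range(flips[0]):
--             rb = rotate(rb, "x")
--         for j in range(flips[1]):
--             rb = rotate(rb, "y")
--         for k in range(flips[2]):
--             rb = rotate(rb, "z")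
--         rotated.append(rb)
--     return rotated
-- ===== SOURCE B (Python) =====
-- def orientBeacons(beacons, flips):
--     rx = lambda v: (v[0], -v[2], v[1])
--     ry = lambda v: (-v[2], v[1], v[0])
--     rz = lambda v: (v[1], -v[0], v[2])
--
--     def net(v):
--         for f, r in zip(flips, (rx, ry, rz)):
--             for _ in range(f % 4 if f > 0 else 0):
--                 v = r(v)
--         return v
--
--     # columns of the net signed-permutation matrix, computed once
--     c1 = net((1, 0, 0))
--     c2 = net((0, 1, 0))
--     c3 = net((0, 0, 1))
--     return [(x * c1[0] + y * c2[0] + z * c3[0],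
--              x * c1[1] + y * c2[1] + z * c3[1],
--              x * c1[2] + y * c2[2] + z * c3[2]) for (x, y, z) in beacons]
-- ===== Notes on version B (the rewrite author's own statement) =====
-- stated objective: faster
-- what changed: B precomputes the net orientation once (rotation counts reduced mod 4 and applied to the three basis vectors, giving a signed-permutation matrix) and then maps each beacon through that matrix in a single pass, instead of re-running flips[0]+flips[1]+flips[2] rotation steps per beacon.
import Mathlib
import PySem

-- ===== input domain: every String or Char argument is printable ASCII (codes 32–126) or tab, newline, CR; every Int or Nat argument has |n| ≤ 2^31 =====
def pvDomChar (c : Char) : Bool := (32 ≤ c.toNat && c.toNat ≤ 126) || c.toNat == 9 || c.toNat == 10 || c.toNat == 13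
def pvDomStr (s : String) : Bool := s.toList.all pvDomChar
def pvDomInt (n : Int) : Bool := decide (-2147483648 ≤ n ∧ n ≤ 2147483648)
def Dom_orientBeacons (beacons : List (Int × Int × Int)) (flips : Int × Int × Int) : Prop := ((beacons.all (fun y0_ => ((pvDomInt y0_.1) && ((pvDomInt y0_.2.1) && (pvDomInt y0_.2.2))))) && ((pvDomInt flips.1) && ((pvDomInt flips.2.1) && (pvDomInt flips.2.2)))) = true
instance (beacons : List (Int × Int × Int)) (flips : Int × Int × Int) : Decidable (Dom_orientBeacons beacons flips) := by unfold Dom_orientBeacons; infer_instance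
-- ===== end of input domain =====

-- B precomputes the net orientation once (counts mod 4 applied to the basis vectors) and maps
-- each beacon through the resulting signed-permutation matrix; A re-rotates every beacon step by step.

-- ===== PORT A =====
-- literal port of Python's rotate(vector, axis); the final branch (axis not "x"/"y"/"z", Python
-- returns None) is never reached by orientBeacons, ported as identity
def pyRotate (v : Int × Int × Int) (axis : String) : Int × Int × Int :=
  if axis = "x" then (v.1, -v.2.2, v.2.1)
  else if axis = "y" then (-v.2.2, v.2.1, v.1)
  else if axis = "z" then (v.2.1, -v.1, v.2.2)
  else v

def orientBeacons (beacons : List (Int × Int × Int)) (flips : Int × Int × Int) : List (Int × Int × Int) :=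
  beacons.foldl (fun rotated b =>
    let rb := (PySem.List.pyRange 0 flips.1 1).foldl (fun rb _ => pyRotate rb "x") b
    let rb := (PySem.List.pyRange 0 flips.2.1 1).foldl (fun rb _ => pyRotate rb "y") rb
    let rb := (PySem.List.pyRange 0 flips.2.2 1).foldl (fun rb _ => pyRotate rb "z") rb
    rotated ++ [rb]) []

-- ===== PORT B =====
def altRx (v : Int × Int × Int) : Int × Int × Int := (v.1, -v.2.2, v.2.1)
def altRy (v : Int × Int × Int) : Int × Int × Int := (-v.2.2, v.2.1, v.1)
def altRz (v : Int × Int × Int) : Int × Int × Int := (v.2.1, -v.1, v.2.2)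

-- Source B: range(f % 4 if f > 0 else 0)
def altRed (f : Int) : Nat := (if 0 < f then f % 4 else 0).toNat

def altNet (flips : Int × Int × Int) (v : Int × Int × Int) : Int × Int × Int :=
  altRz^[altRed flips.2.2] (altRy^[altRed flips.2.1] (altRx^[altRed flips.1] v))

def orientBeacons_alt (beacons : List (Int × Int × Int)) (flips : Int × Int × Int) : List (Int × Int × Int) :=
  let c1 := altNet flips (1, 0, 0)
  let c2 := altNet flips (0, 1, 0)
  let c3 := altNet flips (0, 0, 1)
  beacons.map (fun b =>
    (b.1 * c1.1 + b.2.1 * c2.1 + b.2.2 * c3.1,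
     b.1 * c1.2.1 + b.2.1 * c2.2.1 + b.2.2 * c3.2.1,
     b.1 * c1.2.2 + b.2.1 * c2.2.2 + b.2.2 * c3.2.2))

-- ===== PRECONDITION & SPEC =====
def Spec_orientBeacons (beacons : List (Int × Int × Int)) (flips : Int × Int × Int) (out : List (Int × Int × Int)) : Prop := out = orientBeacons_alt beacons flips
instance (beacons : List (Int × Int × Int)) (flips : Int × Int × Int) (out : List (Int × Int × Int)) : Decidable (Spec_orientBeacons beacons flips out) := by unfold Spec_orientBeacons; infer_instance

-- ===== CLAIM (what is proved, stated in full; the proofs are below) =====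
def Claim_equal_orientBeacons : Prop := ∀ (beacons : List (Int × Int × Int)) (flips : Int × Int × Int), Dom_orientBeacons beacons flips → Spec_orientBeacons beacons flips (orientBeacons beacons flips)

-- ===== LEMMAS AND PROOFS =====

-- a foldl with a constant step is an iterate of the step
theorem foldl_const_iterate {α β : Type} (f : α → α) : ∀ (l : List β) (b : α),
    l.foldl (fun a _ => f a) b = f^[l.length] b := by
  intro l
  induction l with
  | nil => intro b; rfl
  | cons x xs ih => intro b; simp [List.foldl, ih, Function.iterate_succ_apply]

-- four applications of each axis rotation are the identity
theorem altRx_four (v : Int × Int × Int) : altRx (altRx (altRx (altRx v))) = v := by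
  simp [altRx]
theorem altRy_four (v : Int × Int × Int) : altRy (altRy (altRy (altRy v))) = v := by
  simp [altRy]
theorem altRz_four (v : Int × Int × Int) : altRz (altRz (altRz (altRz v))) = v := by
  simp [altRz]

theorem iterate_mod_four {α : Type} (f : α → α) (hf : ∀ v, f (f (f (f v))) = v)
    (n : Nat) (v : α) : f^[n] v = f^[n % 4] v := by
  have h4 : ∀ w : α, f^[4] w = w := by
    intro w; show f (f (f (f w))) = w; exact hf w
  have key : ∀ (q r : Nat) (w : α), f^[4 * q + r] w = f^[r] w := by
    intro q
    induction q with
    | zero => intro r w; simp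
    | succ k ih =>
        intro r w
        have : 4 * (k + 1) + r = (4 * k + r) + 4 := by omega
        rw [this, Function.iterate_add_apply, h4, ih]
  have hn : n = 4 * (n / 4) + n % 4 := by omega
  calc f^[n] v = f^[4 * (n / 4) + n % 4] v := by rw [← hn]
    _ = f^[n % 4] v := key _ _ v

theorem altRed_eq (f : Int) : altRed f = f.toNat % 4 := by
  unfold altRed
  by_cases h : 0 < f <;> simp [h] <;> omega

-- linearity: a map agrees everywhere with the matrix built from its basis images
def Lin3 (f : Int × Int × Int → Int × Int × Int) : Prop :=
  ∀ x y z : Int, f (x, y, z) =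
    (x * (f (1,0,0)).1 + y * (f (0,1,0)).1 + z * (f (0,0,1)).1,
     x * (f (1,0,0)).2.1 + y * (f (0,1,0)).2.1 + z * (f (0,0,1)).2.1,
     x * (f (1,0,0)).2.2 + y * (f (0,1,0)).2.2 + z * (f (0,0,1)).2.2)

theorem lin_id : Lin3 (fun v => v) := by
  intro x y z
  simp

theorem lin_step_rx (f : Int × Int × Int → Int × Int × Int) (hf : Lin3 f) :
    Lin3 (fun v => altRx (f v)) := by
  intro x y z
  simp only [altRx, hf x y z, Prod.mk.injEq]
  and_intros <;> first | trivial | ring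

theorem lin_step_ry (f : Int × Int × Int → Int × Int × Int) (hf : Lin3 f) :
    Lin3 (fun v => altRy (f v)) := by
  intro x y z
  simp only [altRy, hf x y z, Prod.mk.injEq]
  and_intros <;> first | trivial | ring

theorem lin_step_rz (f : Int × Int × Int → Int × Int × Int) (hf : Lin3 f) :
    Lin3 (fun v => altRz (f v)) := by
  intro x y z
  simp only [altRz, hf x y z, Prod.mk.injEq]
  and_intros <;> first | trivial | ring

theorem lin_iter (g : Int × Int × Int → Int × Int × Int)
    (hstep : ∀ f, Lin3 f → Lin3 (fun v => g (f v))) (n : Nat) :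
    ∀ f, Lin3 f → Lin3 (fun v => g^[n] (f v)) := by
  induction n with
  | zero => intro f hf; simpa using hf
  | succ k ih =>
      intro f hf
      have := hstep _ (ih f hf)
      intro x y z
      simpa [Function.iterate_succ_apply'] using this x y z

theorem lin_altNet (flips : Int × Int × Int) : Lin3 (altNet flips) := by
  have h1 := lin_iter altRx lin_step_rx (altRed flips.1) _ lin_id
  have h2 := lin_iter altRy lin_step_ry (altRed flips.2.1) _ h1
  have h3 := lin_iter altRz lin_step_rz (altRed flips.2.2) _ h2
  intro x y z
  simpa [altNet] using h3 x y z

-- A's per-beacon rotation chain equals B's net transform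
theorem perBeacon_eq (flips : Int × Int × Int) (b : Int × Int × Int) :
    (PySem.List.pyRange 0 flips.2.2 1).foldl (fun rb _ => pyRotate rb "z")
      ((PySem.List.pyRange 0 flips.2.1 1).foldl (fun rb _ => pyRotate rb "y")
        ((PySem.List.pyRange 0 flips.1 1).foldl (fun rb _ => pyRotate rb "x") b))
      = altNet flips b := by
  have hx : (fun rb _ => pyRotate rb "x") = (fun (rb : Int × Int × Int) (_ : Int) => altRx rb) := by
    funext rb i; simp [pyRotate, altRx]
  have hy : (fun rb _ => pyRotate rb "y") = (fun (rb : Int × Int × Int) (_ : Int) => altRy rb) := by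
    funext rb i; simp [pyRotate, altRy]
  have hz : (fun rb _ => pyRotate rb "z") = (fun (rb : Int × Int × Int) (_ : Int) => altRz rb) := by
    funext rb i; simp [pyRotate, altRz]
  rw [hx, hy, hz, foldl_const_iterate, foldl_const_iterate, foldl_const_iterate]
  simp only [PySem.List.length_pyRange_one]
  rw [iterate_mod_four altRx altRx_four, iterate_mod_four altRy altRy_four,
      iterate_mod_four altRz altRz_four]
  simp [altNet, altRed_eq]

theorem foldl_append_singleton {α β : Type} (h : α → β) :
    ∀ (l : List α) (acc : List β),
      l.foldl (fun r b => r ++ [h b]) acc = acc ++ l.map h := by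
  intro l
  induction l with
  | nil => intro acc; simp
  | cons x xs ih => intro acc; simp [List.foldl, ih]

-- ===== VERDICT (by name: the statement is the Claim_ definition above) =====
theorem orientBeacons_spec : Claim_equal_orientBeacons := by
  intro beacons flips _
  show orientBeacons beacons flips = orientBeacons_alt beacons flips
  unfold orientBeacons orientBeacons_alt
  have hbody : (fun (rotated : List (Int × Int × Int)) (b : Int × Int × Int) =>
      let rb := (PySem.List.pyRange 0 flips.1 1).foldl (fun rb _ => pyRotate rb "x") b
      let rb := (PySem.List.pyRange 0 flips.2.1 1).foldl (fun rb _ => pyRotate rb "y") rb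
      let rb := (PySem.List.pyRange 0 flips.2.2 1).foldl (fun rb _ => pyRotate rb "z") rb
      rotated ++ [rb]) =
      (fun rotated b => rotated ++ [altNet flips b]) := by
    funext rotated b
    simp only []
    rw [perBeacon_eq]
  rw [hbody, foldl_append_singleton (fun b => altNet flips b) beacons []]
  simp only [List.nil_append]
  apply List.map_congr_left
  intro b _
  obtain ⟨x, y, z⟩ := b
  exact (lin_altNet flips) x y z
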